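-- pv_equiv track=rewrite | github.com/JamesPeralta/Competitive-Programming | LeetCodePractice/PilesOfBoxes.py | piles_of_boxes
-- ===== SOURCE A (Python) =====
-- def piles_of_boxes(boxes):
--     boxes = sorted(boxes, reverse=True)
--
--     index = 0
--     same_level = 1
--     maximum = boxes[0]
--     steps = 0
--     while index + 1 < len(boxes):
--         if boxes[index + 1] == maximum:
--             same_level += 1
--         else:
--             steps += same_level
--             maximum = boxes[index + 1]
--             same_level += 1
--
--         index += 1
--
--     return steps
-- ===== SOURCE B (Python) =====
-- def piles_of_boxes(boxes):
--     freq = {}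
--     for b in boxes:
--         freq[b] = freq.get(b, 0) + 1
--     steps = 0
--     seen = 0
--     for v in sorted(freq, reverse=True):
--         steps += seen
--         seen += freq[v]
--     return steps
-- ===== Notes on version B (the rewrite author's own statement) =====
-- stated objective: alternative
-- what changed: Replaces the lookahead scan over every element of the descending-sorted list with a frequency dictionary built in one pass, then a fold over the sorted distinct values carrying a running total of boxes seen.
import Mathlib
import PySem

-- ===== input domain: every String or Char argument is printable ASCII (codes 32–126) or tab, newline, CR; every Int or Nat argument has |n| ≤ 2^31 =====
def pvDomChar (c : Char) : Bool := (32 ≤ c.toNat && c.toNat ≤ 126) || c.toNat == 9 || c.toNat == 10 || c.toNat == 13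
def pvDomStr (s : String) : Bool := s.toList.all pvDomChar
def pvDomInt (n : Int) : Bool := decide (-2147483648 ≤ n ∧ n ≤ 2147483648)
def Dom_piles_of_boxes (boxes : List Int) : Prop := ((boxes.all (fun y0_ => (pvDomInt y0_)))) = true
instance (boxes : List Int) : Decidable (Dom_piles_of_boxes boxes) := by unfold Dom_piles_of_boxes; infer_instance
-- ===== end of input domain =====

-- B replaces A's element-by-element lookahead scan of the sorted list by a frequency
-- dictionary plus a fold over the sorted distinct values (objective: alternative).

-- ===== PORT A =====
-- the while loop: state (remaining suffix of the sorted list, same_level, maximum, steps)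
def pilesLoopA : List Int → Int → Int → Int → Int
  | [], _, _, steps => steps
  | x :: rest, same_level, maximum, steps =>
    if x = maximum then pilesLoopA rest (same_level + 1) maximum steps
    else pilesLoopA rest (same_level + 1) x (steps + same_level)

def piles_of_boxes (boxes : List Int) : Int :=
  match PySem.List.sorted boxes (fun x => x) true with
  | [] => 0   -- Python raises IndexError at boxes[0] here; excluded by Pre_
  | m :: rest => pilesLoopA rest 1 m 0

-- ===== PORT B =====
def piles_of_boxes_alt (boxes : List Int) : Int :=
  let freq := boxes.foldl (fun d b => d.insert b (d.getD b 0 + 1))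
      (PySem.Dict.empty : PySem.Dict Int Int)
  ((PySem.List.sorted freq.keys (fun x => x) true).foldl
      (fun (p : Int × Int) v => (p.1 + p.2, p.2 + freq.getD v 0)) (0, 0)).1

-- ===== PRECONDITION & SPEC =====
-- Pre_ excludes only the empty list, on which Python A raises IndexError (boxes[0]).
def Pre_piles_of_boxes (boxes : List Int) : Prop := boxes ≠ []
instance (boxes : List Int) : Decidable (Pre_piles_of_boxes boxes) := by unfold Pre_piles_of_boxes; infer_instance
def pvWitness_piles_of_boxes : List Int := [3, 1, 2, 2]

def Spec_piles_of_boxes (boxes : List Int) (out : Int) : Prop := out = piles_of_boxes_alt boxes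
instance (boxes : List Int) (out : Int) : Decidable (Spec_piles_of_boxes boxes out) := by unfold Spec_piles_of_boxes; infer_instance

-- ===== CLAIM (what is proved, stated in full; the proofs are below) =====
def Claim_equal_piles_of_boxes : Prop := ∀ (boxes : List Int), Dom_piles_of_boxes boxes → Pre_piles_of_boxes boxes → Spec_piles_of_boxes boxes (piles_of_boxes boxes)

-- ===== LEMMAS AND PROOFS =====

-- recursive skeleton of B's fold: remaining keys, the count function, boxes seen so far
def pvSumB : List Int → (Int → Int) → Int → Int
  | [], _, _ => 0
  | v :: ks, cnt, seen => seen + pvSumB ks cnt (seen + cnt v)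

theorem pv_foldB (ks : List Int) (cnt : Int → Int) (st sn : Int) :
    (ks.foldl (fun (p : Int × Int) v => (p.1 + p.2, p.2 + cnt v)) (st, sn)).1
      = st + pvSumB ks cnt sn := by
  induction ks generalizing st sn with
  | nil => simp [pvSumB]
  | cons v ks ih => simp only [List.foldl_cons, pvSumB, ih]; ring

theorem pv_count_cons_ne (v x : Int) (r : List Int) (h : v ≠ x) :
    (x :: r).count v = r.count v := by
  simp [Ne.symm h]

theorem pv_head_desc (ds : List Int) (m : Int) (hp : ds.Pairwise (fun a b => b < a))
    (hm : m ∈ ds) (hle : ∀ v ∈ ds, v ≤ m) : ds = m :: ds.tail := by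
  cases ds with
  | nil => cases hm
  | cons h tl =>
    rcases List.mem_cons.mp hm with rfl | hmem
    · rfl
    · have := (List.pairwise_cons.mp hp).1 m hmem
      have := hle h (by simp)
      omega

-- A's scan of the sorted suffix t (current maximum m, same_level c) equals B's fold over
-- the remaining distinct values ds.tail with `seen` already counting c + (copies of m in t).
theorem pv_main (t : List Int) (m c steps : Int) (ds : List Int) (cnt : Int → Int)
    (hs : (m :: t).Pairwise (fun a b => b ≤ a))
    (hds : ds.Pairwise (fun a b => b < a))
    (hmem : ∀ v, v ∈ ds ↔ v ∈ m :: t)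
    (hcnt : ∀ v ∈ ds, v ≠ m → cnt v = (t.count v : Int)) :
    pilesLoopA t c m steps = steps + pvSumB ds.tail cnt (c + (t.count m : Int)) := by
  induction t generalizing m c steps ds cnt with
  | nil =>
    have h1 : ds = m :: ds.tail := by
      refine pv_head_desc ds m hds ((hmem m).mpr (by simp)) ?_
      intro v hv; have := (hmem v).mp hv; simp at this; omega
    have h2 : ds.tail = [] := by
      cases htl : ds.tail with
      | nil => rfl
      | cons b tl2 =>
        exfalso
        have hbds : b ∈ ds := by rw [h1, htl]; simp
        have hbm : b = m := by have := (hmem b).mp hbds; simpa using this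
        have hds2 := hds
        rw [h1, htl] at hds2
        have := (List.pairwise_cons.mp hds2).1 b (by simp)
        omega
    rw [h1, h2]; simp [pilesLoopA, pvSumB]
  | cons x r ih =>
    rcases List.pairwise_cons.mp hs with ⟨hmge, hxr⟩
    by_cases hx : x = m
    · subst hx
      have hstep : pilesLoopA (x :: r) c x steps = pilesLoopA r (c + 1) x steps := by
        simp [pilesLoopA]
      rw [hstep]
      rw [ih x (c + 1) steps ds cnt hxr hds
        (by intro v; rw [hmem v]; simp)
        (by intro v hv hvne
            rw [hcnt v hv hvne, pv_count_cons_ne v x r hvne])]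
      have harg : c + ((x :: r).count x : Int) = c + 1 + ((r.count x : Int)) := by
        rw [List.count_cons_self]; push_cast; ring
      rw [harg]
    · have hxm : x < m := lt_of_le_of_ne (hmge x (by simp)) hx
      have hler : ∀ v ∈ x :: r, v ≤ x := by
        intro v hv
        rcases List.mem_cons.mp hv with rfl | hvr
        · exact le_refl v
        · exact (List.pairwise_cons.mp hxr).1 v hvr
      have hcm0 : (x :: r).count m = 0 := by
        rw [List.count_eq_zero]
        intro hmm; have := hler m hmm; omega
      have hdshead : ds = m :: ds.tail := by
        refine pv_head_desc ds m hds ((hmem m).mpr (by simp)) ?_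
        intro v hv
        rcases List.mem_cons.mp ((hmem v).mp hv) with rfl | hvt
        · exact le_refl v
        · have := hler v hvt; omega
      have hmnotin : ∀ v ∈ ds.tail, v < m := by
        intro v hv
        have := List.pairwise_cons.mp (hdshead ▸ hds)
        exact this.1 v hv
      have hmem0 : ∀ v, v ∈ ds.tail ↔ v ∈ x :: r := by
        intro v
        constructor
        · intro hv
          have hvm := hmnotin v hv
          have : v ∈ m :: x :: r := (hmem v).mp (by rw [hdshead]; simp [hv])
          rcases List.mem_cons.mp this with rfl | h2
          · omega
          · exact h2
        · intro hv
          have hvlt : v < m := by have := hler v hv; omega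
          have : v ∈ ds := (hmem v).mpr (by simp [hv])
          rw [hdshead] at this
          rcases List.mem_cons.mp this with rfl | h2
          · omega
          · exact h2
      have hds0 : ds.tail.Pairwise (fun a b => b < a) :=
        (List.pairwise_cons.mp (hdshead ▸ hds)).2
      have hds0head : ds.tail = x :: ds.tail.tail := by
        refine pv_head_desc ds.tail x hds0 ((hmem0 x).mpr (by simp)) ?_
        intro v hv; exact hler v ((hmem0 v).mp hv)
      have hcntx : cnt x = (r.count x : Int) + 1 := by
        have hxds : x ∈ ds := by rw [hdshead]; simp [(hmem0 x).mpr (by simp : x ∈ x :: r)]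
        rw [hcnt x hxds hx, List.count_cons_self]
        push_cast; ring
      have hstep : pilesLoopA (x :: r) c m steps = pilesLoopA r (c + 1) x (steps + c) := by
        simp [pilesLoopA, hx]
      rw [hstep]
      rw [ih x (c + 1) (steps + c) ds.tail cnt hxr hds0 hmem0
        (by intro v hv hvne
            have hvds : v ∈ ds := by rw [hdshead]; simp [hv]
            have hvm : v < m := hmnotin v hv
            rw [hcnt v hvds (by omega), pv_count_cons_ne v x r hvne])]
      rw [hcm0, hdshead]
      simp only [List.tail_cons]
      rw [hds0head]
      simp only [pvSumB]
      rw [hcntx]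
      push_cast
      ring_nf
      simp only [List.tail_cons]

-- ===== VERDICT (by name: the statement is the Claim_ definition above) =====
theorem piles_of_boxes_spec : Claim_equal_piles_of_boxes := by
  intro boxes _hdom hpre
  unfold Spec_piles_of_boxes
  have hsne : PySem.List.sorted boxes (fun x => x) true ≠ [] := by
    rw [Ne, PySem.List.sorted_eq_nil_iff]; exact hpre
  obtain ⟨m, t, hst⟩ := List.exists_cons_of_ne_nil hsne
  have hA : piles_of_boxes boxes = pilesLoopA t 1 m 0 := by
    unfold piles_of_boxes; rw [hst]
  have hB : piles_of_boxes_alt boxes =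
      ((PySem.List.sorted (boxes.foldl (fun d b => d.insert b (d.getD b 0 + 1))
          (PySem.Dict.empty : PySem.Dict Int Int)).keys (fun x => x) true).foldl
        (fun (p : Int × Int) v => (p.1 + p.2,
          p.2 + (boxes.foldl (fun d b => d.insert b (d.getD b 0 + 1))
            (PySem.Dict.empty : PySem.Dict Int Int)).getD v 0)) (0, 0)).1 := rfl
  rw [hA, hB]
  set freq := boxes.foldl (fun d b => d.insert b (d.getD b 0 + 1))
      (PySem.Dict.empty : PySem.Dict Int Int) with hfreq
  have hkeys : freq.keys = PySem.Set.ofList boxes := by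
    rw [hfreq, PySem.Dict.keys_foldl_insert]; rfl
  have hgetD : ∀ v : Int, freq.getD v 0 = (boxes.count v : Int) := by
    intro v
    rw [hfreq, PySem.Dict.getD_foldl_insert_add_one]
    simp [PySem.Dict.getD, PySem.Dict.get?, PySem.Dict.empty]
  set ds := PySem.List.sorted freq.keys (fun x => x) true with hds
  have hdsnd : ds.Nodup := by
    rw [hds, hkeys]
    exact (PySem.List.sorted_perm (PySem.Set.ofList boxes) (fun x => x) true).symm.nodup
      (PySem.Set.nodup_ofList boxes)
  have hdspw : ds.Pairwise (fun a b => b < a) :=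
    ((PySem.List.sorted_pairwise_rev freq.keys (fun x => x)).and hdsnd).imp
      (fun h => lt_of_le_of_ne h.1 (Ne.symm h.2))
  have hspw : (m :: t).Pairwise (fun a b => b ≤ a) := by
    rw [← hst]; exact PySem.List.sorted_pairwise_rev boxes (fun x => x)
  have hcount : ∀ v : Int, boxes.count v = (m :: t).count v := by
    intro v
    exact ((PySem.List.sorted_perm boxes (fun x => x) true).count_eq v).symm.trans
      (by rw [hst])
  have hmemds : ∀ v : Int, v ∈ ds ↔ v ∈ m :: t := by
    intro v
    rw [hds, PySem.List.mem_sorted, hkeys, PySem.Set.mem_ofList,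
      ← hst, PySem.List.mem_sorted]
  have hdshead : ds = m :: ds.tail := by
    refine pv_head_desc ds m hdspw ((hmemds m).mpr (by simp)) ?_
    intro v hv
    rcases List.mem_cons.mp ((hmemds v).mp hv) with rfl | hvt
    · exact le_refl v
    · exact (List.pairwise_cons.mp hspw).1 v hvt
  have hcm : freq.getD m 0 = (t.count m : Int) + 1 := by
    rw [hgetD, hcount, List.count_cons_self]; push_cast; ring
  rw [pv_main t m 1 0 ds (fun v => freq.getD v 0) hspw hdspw hmemds
    (by intro v hv hvne
        show freq.getD v 0 = (t.count v : Int)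
        rw [hgetD v, hcount v, pv_count_cons_ne v m t hvne])]
  rw [pv_foldB, hdshead]
  simp only [pvSumB, zero_add]
  rw [hcm]
  congr 1
  ring
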